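-- pv_equiv track=rewrite | github.com/m-tranter/cathedral | python/Y7/sieve.py | display
-- ===== SOURCE A (Python) =====
-- def display(array):
--     """Returns a string made up of all the indices of elements marked True."""
--     s, j = "\nPrimes:\n", 0
--     p = len(str(len(array))) + 1
--     # Using a slice to skip the first two elements in the list (zero and one).
--     for (i, isPrime) in enumerate(array[2:], 2):
--         if isPrime:
--             s += str(i).rjust(p)
--             j += 1
--             if not j % 10:
--                 s += '\n'
--     return s
-- ===== SOURCE B (Python) =====
-- def display(array):
--     """Returns a string made up of all the indices of elements marked True."""
--     p = len(str(len(array))) + 1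
--     primes = [i for i, v in enumerate(array) if i >= 2 and v]
--     parts = ["\nPrimes:\n"]
--     for k in range(0, len(primes), 10):
--         chunk = primes[k:k + 10]
--         parts.append(''.join(str(i).rjust(p) for i in chunk))
--         if len(chunk) == 10:
--             parts.append('\n')
--     return ''.join(parts)
-- ===== Notes on version B (the rewrite author's own statement) =====
-- stated objective: alternative
-- what changed: Replaced A's single accumulating loop with a mutable prime counter and a mod-10 newline test by a two-phase decomposition: first collect the prime indices in one comprehension, then emit them in slices of 10, appending a newline exactly after full slices.
import Mathlib
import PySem

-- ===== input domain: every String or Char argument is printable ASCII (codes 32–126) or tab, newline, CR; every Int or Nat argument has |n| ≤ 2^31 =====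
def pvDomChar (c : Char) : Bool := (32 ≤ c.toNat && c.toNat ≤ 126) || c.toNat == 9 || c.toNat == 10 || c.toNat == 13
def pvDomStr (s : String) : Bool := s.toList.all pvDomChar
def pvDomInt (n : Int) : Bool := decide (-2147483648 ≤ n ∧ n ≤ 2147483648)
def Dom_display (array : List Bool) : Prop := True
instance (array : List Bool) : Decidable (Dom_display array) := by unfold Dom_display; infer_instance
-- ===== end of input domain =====

-- B replaces A's accumulating loop with mod-10 counter by: collect prime indices, then emit chunks
-- of 10 with a newline after each full chunk ("alternative" decomposition, same cost).
-- Both ports accumulate the string as List Char and wrap with String.mk at the end (exact: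
-- Python str concatenation on these code points is list-of-code-points concatenation).

-- ===== PORT A =====
-- str(i).rjust(p): left-pad with spaces to width p (exact; Python returns the string unchanged
-- when p ≤ len, matched by Nat subtraction giving 0).
def pvRjust (cs : List Char) (w : Int) : List Char :=
  List.replicate (w.toNat - cs.length) ' ' ++ cs

def displayLoop (p : Int) : List (Int × Bool) → List Char × Int → List Char × Int
  | [], st => st
  | (i, b) :: rest, (s, j) =>
    displayLoop p rest <|
      if b then
        let s' := s ++ pvRjust (PySem.Int.toChars i) p
        let j' := j + 1
        (if j' % 10 == 0 then s' ++ ['\n'] else s', j')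
      else (s, j)

def display (array : List Bool) : String :=
  let p : Int := ((PySem.Int.toChars (PySem.List.len array)).length : Int) + 1
  String.mk (displayLoop p
    (PySem.List.enumerate (PySem.List.slice array (some 2) none) 2)
    ("\nPrimes:\n".toList, 0)).1

-- ===== PORT B =====
def pvChunkStr (p : Int) (c : List Int) : List Char :=
  (c.map (fun i => pvRjust (PySem.Int.toChars i) p)).flatten

def pvChunks (p : Int) : List Int → List Char
  | [] => []
  | x :: xs =>
    pvChunkStr p ((x :: xs).take 10) ++
      (if ((x :: xs).take 10).length == 10 then ['\n'] else []) ++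
      pvChunks p ((x :: xs).drop 10)
  termination_by l => l.length
  decreasing_by simp [List.length_drop]

def display_alt (array : List Bool) : String :=
  let p : Int := ((PySem.Int.toChars (PySem.List.len array)).length : Int) + 1
  let primes := ((PySem.List.enumerate array 0).filter
      (fun iv => decide (2 ≤ iv.1) && iv.2)).map (·.1)
  String.mk ("\nPrimes:\n".toList ++ pvChunks p primes)

-- ===== PRECONDITION & SPEC =====
def Spec_display (array : List Bool) (out : String) : Prop := out = display_alt array
instance (array : List Bool) (out : String) : Decidable (Spec_display array out) := by unfold Spec_display; infer_instance

-- ===== CLAIM (what is proved, stated in full; the proofs are below) =====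
def Claim_equal_display : Prop := ∀ (array : List Bool), Dom_display array → Spec_display array (display array)

-- ===== LEMMAS AND PROOFS =====

-- render of the prime-index list, A's shape: sequential counter, newline when it hits a multiple of 10
def pvRend (p : Int) : List Int → Int → List Char → List Char
  | [], _, s => s
  | i :: rest, j, s =>
    pvRend p rest (j + 1)
      (if (j + 1) % 10 == 0 then (s ++ pvRjust (PySem.Int.toChars i) p) ++ ['\n']
       else s ++ pvRjust (PySem.Int.toChars i) p)

theorem displayLoop_eq_rend (p : Int) (l : List (Int × Bool)) :
    ∀ (s : List Char) (j : Int),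
      (displayLoop p l (s, j)).1 = pvRend p ((l.filter (·.2)).map (·.1)) j s := by
  induction l with
  | nil => intro s j; simp [displayLoop, pvRend]
  | cons hd tl ih =>
    intro s j
    obtain ⟨i, b⟩ := hd
    cases b with
    | false => simpa [displayLoop] using ih s j
    | true =>
      simp only [displayLoop, List.filter, List.map]
      by_cases h : (j + 1) % 10 == 0 <;> simp [h, pvRend, ih]

theorem rend_chunk (p : Int) (c : List Int) :
    ∀ (r : List Int) (j : Int) (s : List Char), 0 ≤ j →
      (c.length : Int) ≤ 10 - j % 10 →
      pvRend p (c ++ r) j s =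
        pvRend p r (j + c.length)
          (s ++ pvChunkStr p c ++
            (if (c.length : Int) = 10 - j % 10 then ['\n'] else [])) := by
  induction c with
  | nil =>
    intro r j s hj _
    have hne : ¬ ((0 : Int) = 10 - j % 10) := by omega
    simp [pvChunkStr, hne]
  | cons i c' ih =>
    intro r j s hj hlen
    simp only [List.length_cons] at hlen
    push_cast at hlen
    by_cases h : (j + 1) % 10 = 0
    · have hj9 : j % 10 = 9 := by omega
      have hc' : c' = [] := by
        refine List.eq_nil_of_length_eq_zero ?_
        omega
      subst hc'
      have hbt : ((j + 1) % 10 == 0) = true := by simp [h]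
      simp [pvRend, hbt, pvChunkStr, hj9]
    · have hbf : ((j + 1) % 10 == 0) = false := by simp [h]
      have hlen' : ((c'.length : Nat) : Int) ≤ 10 - (j + 1) % 10 := by omega
      simp only [List.cons_append, pvRend, hbf, Bool.false_eq_true, if_false]
      rw [ih r (j + 1) _ (by omega) hlen']
      congr 1
      · simp only [List.length_cons]; push_cast; ring
      · have hiff : ((c'.length : Int) = 10 - (j + 1) % 10)
            ↔ (((i :: c').length : Int) = 10 - j % 10) := by
          simp only [List.length_cons]; push_cast; omega
        by_cases hc : (c'.length : Int) = 10 - (j + 1) % 10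
        · rw [if_pos hc, if_pos (hiff.mp hc)]
          simp [pvChunkStr]
        · rw [if_neg hc, if_neg (fun h' => hc (hiff.mpr h'))]
          simp [pvChunkStr]

theorem rend_eq_chunks (p : Int) :
    ∀ (n : Nat) (primes : List Int), primes.length ≤ n →
      ∀ (j : Int) (s : List Char), 0 ≤ j → j % 10 = 0 →
        pvRend p primes j s = s ++ pvChunks p primes := by
  intro n
  induction n with
  | zero =>
    intro primes hlen j s _ _
    have h0 : primes = [] := List.eq_nil_of_length_eq_zero (by omega)
    subst h0; rw [pvRend, pvChunks]; simp
  | succ n ih =>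
    intro primes hlen j s hj hj10
    match primes with
    | [] => rw [pvRend, pvChunks]; simp
    | x :: xs =>
      have hsplit : x :: xs = (x :: xs).take 10 ++ (x :: xs).drop 10 :=
        (List.take_append_drop 10 (x :: xs)).symm
      have htl : ((x :: xs).take 10).length = min 10 (x :: xs).length :=
        List.length_take
      have hclen : (((x :: xs).take 10).length : Int) ≤ 10 - j % 10 := by
        rw [htl, hj10]; push_cast; omega
      rw [hsplit, rend_chunk p _ _ j s hj hclen]
      rw [← hsplit]
      by_cases hfull : ((x :: xs).take 10).length = 10
      · have h10 : 10 ≤ (x :: xs).length := by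
          by_contra hlt
          push_neg at hlt
          rw [List.take_of_length_le (by omega)] at hfull
          omega
        have hd10 : ((x :: xs).drop 10).length ≤ n := by
          rw [List.length_drop]
          simp only [List.length_cons] at hlen h10 ⊢
          omega
        rw [ih _ hd10 (j + ((x :: xs).take 10).length) _ (by omega)
          (by rw [hfull]; omega)]
        have hcond : ((((x :: xs).take 10).length : Nat) : Int) = 10 - j % 10 := by
          rw [hfull, hj10]; norm_num
        rw [if_pos hcond]
        conv_rhs => rw [pvChunks]
        have hb : (((x :: xs).take 10).length == 10) = true := by rw [hfull]; rfl
        rw [hb]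
        simp
      · have hcond : ¬ ((((x :: xs).take 10).length : Nat) : Int) = 10 - j % 10 := by
          rw [hj10]; intro hcc
          exact hfull (by omega)
        have hshort : (x :: xs).length < 10 := by
          by_contra hge
          push_neg at hge
          exact hfull (by rw [List.length_take]; omega)
        have hto : (x :: xs).take 10 = x :: xs := List.take_of_length_le (by omega)
        have hdrop : (x :: xs).drop 10 = [] := List.drop_eq_nil_of_le (by omega)
        rw [if_neg hcond, hdrop]
        rw [pvRend]
        conv_rhs => rw [pvChunks]
        have hb : (((x :: xs).take 10).length == 10) = false := by
          rw [hto, beq_eq_false_iff_ne]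
          omega
        rw [hb, hdrop]
        simp [pvChunks]

theorem filter_ge_two (rest : List Bool) :
    ∀ (k : Int), 2 ≤ k →
      (PySem.List.enumerate rest k).filter (fun iv => decide (2 ≤ iv.1) && iv.2)
        = (PySem.List.enumerate rest k).filter (·.2) := by
  induction rest with
  | nil => intro k _; simp [PySem.List.enumerate_nil]
  | cons b bs ih =>
    intro k hk
    have hrec := ih (k + 1) (by omega)
    simp only [PySem.List.enumerate_cons, List.filter_cons, hrec]
    simp [hk]

theorem primes_eq (array : List Bool) :
    (((PySem.List.enumerate (array.drop 2) 2).filter (·.2)).map (·.1))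
      = (((PySem.List.enumerate array 0).filter
          (fun iv => decide (2 ≤ iv.1) && iv.2)).map (·.1)) := by
  match array with
  | [] => simp [PySem.List.enumerate_nil]
  | [a] => simp [PySem.List.enumerate_nil, PySem.List.enumerate_cons]
  | a :: b :: rest =>
    rw [show (a :: b :: rest).drop 2 = rest from rfl]
    have h0 : ¬ ((2 : Int) ≤ 0) := by omega
    have h1 : ¬ ((2 : Int) ≤ 0 + 1) := by omega
    simp only [PySem.List.enumerate_cons, List.filter_cons]
    rw [filter_ge_two rest (0 + 1 + 1) (by omega)]
    norm_num

-- ===== VERDICT (by name: the statement is the Claim_ definition above) =====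
theorem display_spec : Claim_equal_display := by
  intro array _
  unfold Spec_display
  simp only [display, display_alt]
  have hslice : PySem.List.slice array (some 2) none = array.drop 2 := by
    rw [PySem.List.slice_from]
    · rfl
    · norm_num
  rw [hslice, displayLoop_eq_rend, primes_eq,
    rend_eq_chunks _ _ _ (le_refl _) 0 _ (by norm_num) (by norm_num)]
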